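-- pv_equiv track=rewrite | github.com/J-Rosales/modular-ai-character-catalog | tests/conftest.py | _format_snapshot_diff
-- ===== SOURCE A (Python) =====
-- def _format_snapshot_diff(before: dict[str, tuple[int, int]], after: dict[str, tuple[int, int]]) -> str:
--     before_keys = set(before)
--     after_keys = set(after)
--     added = sorted(after_keys - before_keys)
--     removed = sorted(before_keys - after_keys)
--     changed = sorted(
--         path for path in before_keys & after_keys if before[path] != after[path]
--     )
--     lines = []
--     if added:
--         lines.append("Added files in src/data:")
--         lines.extend(f"  + {path}" for path in added)
--     if removed:
--         lines.append("Removed files from src/data:")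
--         lines.extend(f"  - {path}" for path in removed)
--     if changed:
--         lines.append("Modified files in src/data:")
--         lines.extend(f"  * {path}" for path in changed)
--     return "\n".join(lines)
-- ===== SOURCE B (Python) =====
-- def _format_snapshot_diff(before: dict[str, tuple[int, int]], after: dict[str, tuple[int, int]]) -> str:
--     bk = sorted(before)
--     ak = sorted(after)
--     i = j = 0
--     removed: list[str] = []
--     added: list[str] = []
--     changed: list[str] = []
--     # two-pointer merge of the two sorted key lists
--     while i < len(bk) and j < len(ak):
--         if bk[i] < ak[j]:
--             removed.append(bk[i])
--             i += 1
--         elif ak[j] < bk[i]: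
--             added.append(ak[j])
--             j += 1
--         else:
--             if before[bk[i]] != after[ak[j]]:
--                 changed.append(bk[i])
--             i += 1
--             j += 1
--     removed.extend(bk[i:])
--     added.extend(ak[j:])
--     lines = []
--     if added:
--         lines.append("Added files in src/data:")
--         lines.extend(f"  + {path}" for path in added)
--     if removed:
--         lines.append("Removed files from src/data:")
--         lines.extend(f"  - {path}" for path in removed)
--     if changed:
--         lines.append("Modified files in src/data:")
--         lines.extend(f"  * {path}" for path in changed)
--     return "\n".join(lines)
-- ===== Notes on version B (the rewrite author's own statement) =====
-- stated objective: alternative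
-- what changed: A computes three separate set differences/intersections and sorts each group; B sorts the two key lists once and does a two-pointer merge of them, emitting removed/added/changed in a single synchronized scan with no set operations.
import Mathlib
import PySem

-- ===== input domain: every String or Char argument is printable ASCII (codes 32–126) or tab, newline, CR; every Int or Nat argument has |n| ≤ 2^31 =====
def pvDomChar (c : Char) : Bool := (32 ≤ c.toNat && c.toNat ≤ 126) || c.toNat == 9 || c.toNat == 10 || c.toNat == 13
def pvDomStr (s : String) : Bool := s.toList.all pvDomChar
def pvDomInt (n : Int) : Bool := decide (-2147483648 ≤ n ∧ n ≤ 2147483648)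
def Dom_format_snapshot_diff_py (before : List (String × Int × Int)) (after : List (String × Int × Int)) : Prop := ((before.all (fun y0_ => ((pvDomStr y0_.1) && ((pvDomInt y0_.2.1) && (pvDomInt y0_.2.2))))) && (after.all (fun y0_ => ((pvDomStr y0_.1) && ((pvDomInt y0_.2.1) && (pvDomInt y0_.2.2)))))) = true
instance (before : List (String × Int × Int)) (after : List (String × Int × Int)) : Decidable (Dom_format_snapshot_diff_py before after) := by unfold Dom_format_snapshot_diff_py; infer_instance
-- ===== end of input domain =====

-- B replaces A's three set differences/intersections (each sorted separately) by a
-- two-pointer merge of the two sorted key lists, classifying each key in one synchronized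
-- scan (objective: alternative algorithm, same asymptotic cost).

-- ===== PORT A =====
def format_snapshot_diff_py (before : List (String × Int × Int)) (after : List (String × Int × Int)) : String :=
  let beforeKeys : List String := PySem.Set.ofList (before.map Prod.fst)
  let afterKeys : List String := PySem.Set.ofList (after.map Prod.fst)
  let added := PySem.List.sorted (PySem.Set.diff afterKeys beforeKeys) (fun x => x) false
  let removed := PySem.List.sorted (PySem.Set.diff beforeKeys afterKeys) (fun x => x) false
  let changed := PySem.List.sorted
      ((PySem.Set.inter beforeKeys afterKeys).filter
        (fun path => (PySem.Dict.mk before).get? path != (PySem.Dict.mk after).get? path))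
      (fun x => x) false
  let lines : List String :=
    (if added.isEmpty then [] else "Added files in src/data:" :: added.map (fun path => "  + " ++ path)) ++
    (if removed.isEmpty then [] else "Removed files from src/data:" :: removed.map (fun path => "  - " ++ path)) ++
    (if changed.isEmpty then [] else "Modified files in src/data:" :: changed.map (fun path => "  * " ++ path))
  PySem.Str.join "\n" lines

-- ===== PORT B =====
-- the while loop of Source B: two-pointer merge of the two sorted key lists,
-- returning (removed, added, changed); the final extend of the leftover
-- slices bk[i:], ak[j:] is the two base cases
def pvMergeDiff (db da : PySem.Dict String (Int × Int)) : List String → List String → List String × List String × List String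
  | [], a => ([], a, [])
  | b, [] => (b, [], [])
  | k :: bs, k' :: as_ =>
      if k < k' then
        let r := pvMergeDiff db da bs (k' :: as_)
        (k :: r.1, r.2.1, r.2.2)
      else if k' < k then
        let r := pvMergeDiff db da (k :: bs) as_
        (r.1, k' :: r.2.1, r.2.2)
      else
        let r := pvMergeDiff db da bs as_
        (r.1, r.2.1, if db.get? k != da.get? k then k :: r.2.2 else r.2.2)
  termination_by b a => b.length + a.length
  decreasing_by all_goals (simp only [List.length_cons]; omega)

def format_snapshot_diff_py_alt (before : List (String × Int × Int)) (after : List (String × Int × Int)) : String :=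
  let bk := PySem.List.sorted (PySem.Dict.mk before).keys (fun x => x) false
  let ak := PySem.List.sorted (PySem.Dict.mk after).keys (fun x => x) false
  let g := pvMergeDiff (PySem.Dict.mk before) (PySem.Dict.mk after) bk ak
  let removed := g.1
  let added := g.2.1
  let changed := g.2.2
  let lines : List String :=
    (if added.isEmpty then [] else "Added files in src/data:" :: added.map (fun path => "  + " ++ path)) ++
    (if removed.isEmpty then [] else "Removed files from src/data:" :: removed.map (fun path => "  - " ++ path)) ++
    (if changed.isEmpty then [] else "Modified files in src/data:" :: changed.map (fun path => "  * " ++ path))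
  PySem.Str.join "\n" lines

-- ===== PRECONDITION & SPEC =====
-- Pre_ excludes association lists with duplicate keys: they do not encode a Python dict
-- (A's declared parameter type), so behaviour there is an artefact of the list encoding.
def Pre_format_snapshot_diff_py (before : List (String × Int × Int)) (after : List (String × Int × Int)) : Prop :=
  (before.map Prod.fst).Nodup ∧ (after.map Prod.fst).Nodup
instance (before : List (String × Int × Int)) (after : List (String × Int × Int)) : Decidable (Pre_format_snapshot_diff_py before after) := by unfold Pre_format_snapshot_diff_py; infer_instance
def pvWitness_format_snapshot_diff_py : (List (String × Int × Int)) × (List (String × Int × Int)) :=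
  ([("a", 1, 2), ("b", 3, 4)], [("b", 3, 5), ("c", 0, 0)])

def Spec_format_snapshot_diff_py (before : List (String × Int × Int)) (after : List (String × Int × Int)) (out : String) : Prop := out = format_snapshot_diff_py_alt before after
instance (before : List (String × Int × Int)) (after : List (String × Int × Int)) (out : String) : Decidable (Spec_format_snapshot_diff_py before after out) := by unfold Spec_format_snapshot_diff_py; infer_instance

-- ===== CLAIM (what is proved, stated in full; the proofs are below) =====
def Claim_equal_format_snapshot_diff_py : Prop := ∀ (before : List (String × Int × Int)) (after : List (String × Int × Int)), Dom_format_snapshot_diff_py before after → Pre_format_snapshot_diff_py before after → Spec_format_snapshot_diff_py before after (format_snapshot_diff_py before after)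

-- ===== LEMMAS AND PROOFS =====

-- the merge on two strictly increasing key lists is the three filters
theorem pvMergeDiff_eq (db da : PySem.Dict String (Int × Int)) (b a : List String) :
    b.Pairwise (· < ·) → a.Pairwise (· < ·) →
    pvMergeDiff db da b a =
      (b.filter (fun k => !a.contains k),
       a.filter (fun k => !b.contains k),
       b.filter (fun k => a.contains k && (db.get? k != da.get? k))) := by
  induction b generalizing a with
  | nil =>
      intro _ _; simp [pvMergeDiff]
  | cons k bs ihb =>
      induction a with
      | nil => intro _ _; simp [pvMergeDiff]
      | cons k' as_ iha =>
          intro hb ha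
          have hbk : ∀ x ∈ bs, k < x := (List.pairwise_cons.mp hb).1
          have hbs : bs.Pairwise (· < ·) := (List.pairwise_cons.mp hb).2
          have hak : ∀ x ∈ as_, k' < x := (List.pairwise_cons.mp ha).1
          have has : as_.Pairwise (· < ·) := (List.pairwise_cons.mp ha).2
          rcases lt_trichotomy k k' with hlt | heq | hgt
          · -- k < k' : k is removed
            rw [pvMergeDiff, if_pos hlt, ihb (k' :: as_) hbs ha]
            have hnk : ((k' :: as_).contains k) = false := by
              simp only [List.contains_eq_mem, decide_eq_false_iff_not, List.mem_cons]
              rintro (rfl | hmem)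
              · exact absurd hlt (lt_irrefl k)
              · exact absurd hlt (not_lt_of_gt (hak k hmem))
            have hc1 : ∀ x ∈ k' :: as_, (!(k :: bs).contains x) = (!bs.contains x) := by
              intro x hx
              have hxk : x ≠ k := by
                rcases List.mem_cons.mp hx with rfl | hmem
                · exact fun h => absurd (h ▸ hlt) (lt_irrefl x)
                · exact fun h => absurd (h ▸ hak x hmem) (not_lt_of_gt hlt)
              simp [List.contains_eq_mem, hxk]
            refine Prod.ext ?_ (Prod.ext ?_ ?_) <;> simp only
            · rw [List.filter_cons, hnk]
              rw [if_pos (by simp)]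
            · exact (List.filter_congr hc1).symm
            · rw [List.filter_cons, hnk]
              rw [if_neg (by simp)]
          · -- k = k'
            subst heq
            rw [pvMergeDiff, if_neg (lt_irrefl k), if_neg (lt_irrefl k), ihb as_ hbs has]
            have hne : ∀ x ∈ bs, x ≠ k := fun x hx h => absurd (h ▸ hbk x hx) (lt_irrefl k)
            have hnea : ∀ x ∈ as_, x ≠ k := fun x hx h => absurd (h ▸ hak x hx) (lt_irrefl k)
            have hcb1 : ∀ x ∈ bs, (!(k :: as_).contains x) = (!as_.contains x) := by
              intro x hx; simp [List.contains_eq_mem, hne x hx]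
            have hca1 : ∀ x ∈ as_, (!(k :: bs).contains x) = (!bs.contains x) := by
              intro x hx; simp [List.contains_eq_mem, hnea x hx]
            have hcb2 : ∀ x ∈ bs,
                ((k :: as_).contains x && (db.get? x != da.get? x))
                  = (as_.contains x && (db.get? x != da.get? x)) := by
              intro x hx; simp [List.contains_eq_mem, hne x hx]
            have hmemk : ((k :: as_).contains k) = true := by simp
            have hnotk : ((k :: bs).contains k) = true := by simp
            refine Prod.ext ?_ (Prod.ext ?_ ?_) <;> simp only
            · rw [List.filter_cons, hmemk]
              rw [if_neg (by simp)]
              exact (List.filter_congr hcb1).symm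
            · rw [List.filter_cons, hnotk]
              rw [if_neg (by simp)]
              exact (List.filter_congr hca1).symm
            · rw [List.filter_cons, hmemk]
              simp only [Bool.true_and]
              by_cases hv : (db.get? k != da.get? k) = true
              · simp only [if_pos hv]
                exact congrArg (List.cons k) (List.filter_congr hcb2).symm
              · simp only [if_neg hv]
                exact (List.filter_congr hcb2).symm
          · -- k' < k : k' is added
            rw [pvMergeDiff, if_neg (not_lt_of_gt hgt), if_pos hgt, iha hb has]
            have hnk' : ((k :: bs).contains k') = false := by
              simp only [List.contains_eq_mem, decide_eq_false_iff_not, List.mem_cons]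
              rintro (rfl | hmem)
              · exact absurd hgt (lt_irrefl k')
              · exact absurd hgt (not_lt_of_gt (hbk k' hmem))
            have hne : ∀ x ∈ k :: bs, x ≠ k' := by
              intro x hx
              rcases List.mem_cons.mp hx with rfl | hmem
              · exact fun h => absurd (h ▸ hgt) (lt_irrefl x)
              · exact fun h => absurd (h ▸ hbk x hmem) (not_lt_of_gt hgt)
            have hc1 : ∀ x ∈ k :: bs, (!(k' :: as_).contains x) = (!as_.contains x) := by
              intro x hx; simp [List.contains_eq_mem, hne x hx]
            have hc2 : ∀ x ∈ k :: bs,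
                ((k' :: as_).contains x && (db.get? x != da.get? x))
                  = (as_.contains x && (db.get? x != da.get? x)) := by
              intro x hx; simp [List.contains_eq_mem, hne x hx]
            refine Prod.ext ?_ (Prod.ext ?_ ?_) <;> simp only
            · exact (List.filter_congr hc1).symm
            · rw [List.filter_cons, hnk']
              rw [if_pos (by simp)]
            · exact (List.filter_congr hc2).symm

-- sorted of a nodup list is strictly increasing
theorem sorted_strict (u : List String) (hu : u.Nodup) :
    (PySem.List.sorted u (fun x => x) false).Pairwise (· < ·) := by
  have hperm : (PySem.List.sorted u (fun x => x) false).Perm u := PySem.List.sorted_perm u _ _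
  have hnd : (PySem.List.sorted u (fun x => x) false).Nodup := hperm.nodup_iff.mpr hu
  have hle : (PySem.List.sorted u (fun x => x) false).Pairwise (fun a b => a ≤ b) :=
    PySem.List.sorted_pairwise u (fun x => x)
  exact (hle.and hnd).imp (fun hx => lt_of_le_of_ne hx.1 hx.2)

-- sorting a nodup list = filtering a sorted nodup list with the same filtered membership
theorem sorted_eq_filter_sorted (s u : List String) (p : String → Bool)
    (hs : s.Nodup) (hu : u.Nodup)
    (hm : ∀ x, x ∈ s ↔ (x ∈ u ∧ p x = true)) :
    PySem.List.sorted s (fun x => x) false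
      = (PySem.List.sorted u (fun x => x) false).filter p := by
  have hperm : (PySem.List.sorted u (fun x => x) false).Perm u := PySem.List.sorted_perm u _ _
  have hnodup_su : (PySem.List.sorted u (fun x => x) false).Nodup := hperm.nodup_iff.mpr hu
  have hlt := sorted_strict u hu
  refine PySem.List.sorted_eq_of_perm_of_pairwise_lt s _ (fun x => x) ?_ (hlt.filter p)
  refine (List.perm_ext_iff_of_nodup (hnodup_su.filter p) hs).mpr ?_
  intro x
  simp only [List.mem_filter, hperm.mem_iff, hm]

-- ===== VERDICT (by name: the statement is the Claim_ definition above) =====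
theorem format_snapshot_diff_py_spec : Claim_equal_format_snapshot_diff_py := by
  intro before after _hdom hpre
  obtain ⟨hb, ha⟩ := hpre
  unfold Spec_format_snapshot_diff_py format_snapshot_diff_py format_snapshot_diff_py_alt
  dsimp only
  rw [PySem.Dict.keys_mk, PySem.Dict.keys_mk]
  rw [pvMergeDiff_eq _ _ _ _ (sorted_strict _ hb) (sorted_strict _ ha)]
  dsimp only
  rw [← sorted_eq_filter_sorted
        (PySem.Set.diff (PySem.Set.ofList (before.map Prod.fst)) (PySem.Set.ofList (after.map Prod.fst)))
        (before.map Prod.fst)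
        (fun k => !(PySem.List.sorted (after.map Prod.fst) (fun x => x) false).contains k)
        (PySem.Set.nodup_diff _ _ (PySem.Set.nodup_ofList _)) hb
        (by
          intro x
          simp only [PySem.Set.mem_diff, PySem.Set.mem_ofList, Bool.not_eq_true',
            List.contains_eq_mem, decide_eq_false_iff_not, PySem.List.mem_sorted])]
  rw [← sorted_eq_filter_sorted
        (PySem.Set.diff (PySem.Set.ofList (after.map Prod.fst)) (PySem.Set.ofList (before.map Prod.fst)))
        (after.map Prod.fst)
        (fun k => !(PySem.List.sorted (before.map Prod.fst) (fun x => x) false).contains k)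
        (PySem.Set.nodup_diff _ _ (PySem.Set.nodup_ofList _)) ha
        (by
          intro x
          simp only [PySem.Set.mem_diff, PySem.Set.mem_ofList, Bool.not_eq_true',
            List.contains_eq_mem, decide_eq_false_iff_not, PySem.List.mem_sorted])]
  rw [← sorted_eq_filter_sorted
        ((PySem.Set.inter (PySem.Set.ofList (before.map Prod.fst)) (PySem.Set.ofList (after.map Prod.fst))).filter
          (fun path => (PySem.Dict.mk before).get? path != (PySem.Dict.mk after).get? path))
        (before.map Prod.fst)
        (fun k => (PySem.List.sorted (after.map Prod.fst) (fun x => x) false).contains k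
              && ((PySem.Dict.mk before).get? k != (PySem.Dict.mk after).get? k))
        ((PySem.Set.nodup_inter _ _ (PySem.Set.nodup_ofList _)).filter _) hb
        (by
          intro x
          simp only [List.mem_filter, PySem.Set.mem_inter, PySem.Set.mem_ofList,
            Bool.and_eq_true, List.contains_eq_mem, decide_eq_true_eq, PySem.List.mem_sorted]
          tauto)]
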